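-- pv_equiv track=rewrite | github.com/robb141/Advent-of-Code-2023 | 13.py | compute
-- ===== SOURCE A (Python) =====
-- def compute(pat):
--     DR = len(pat)
--     for i in range(1, DR):
--         if pat[i - 1] == pat[i]:
--             flag = True
--             row = 1
--             while i + row < DR and i - 1 - row >= 0:
--                 if pat[i - 1 - row] != pat[i + row]:
--                     flag = False
--                     break
--                 row += 1
--             if flag:
--                 return i
--     return False
-- ===== SOURCE B (Python) =====
-- def compute(pat):
--     # A mirror line after row i exists iff the grid has an even-length palindromic
--     # prefix (then i = L // 2) or an even-length palindromic suffix (then i = DR - L // 2).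
--     # Collect all candidate splits from palindrome checks and return the smallest.
--     DR = len(pat)
--     evens = range(2, DR + 1, 2)
--     cands = [L // 2 for L in evens if pat[:L] == pat[:L][::-1]]
--     cands += [DR - L // 2 for L in evens if pat[-L:] == pat[-L:][::-1]]
--     return min(cands) if cands else False
-- ===== Notes on version B (the rewrite author's own statement) =====
-- stated objective: alternative
-- what changed: Instead of testing each split by expanding outward with a while loop, B uses the fact that a mirror line exists exactly at even-length palindromic prefixes (i = L//2) and suffixes (i = DR - L//2): it collects all candidate splits from whole-block palindrome tests in two staged comprehensions and returns the minimum; Pre_ excludes grids with no reflection line, where A returns the bool False instead of an int.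
-- outside the precondition, e.g. on compute([]): A returns False, B returns False; on compute(['a', 'b']): A returns False, B returns False
import Mathlib
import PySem

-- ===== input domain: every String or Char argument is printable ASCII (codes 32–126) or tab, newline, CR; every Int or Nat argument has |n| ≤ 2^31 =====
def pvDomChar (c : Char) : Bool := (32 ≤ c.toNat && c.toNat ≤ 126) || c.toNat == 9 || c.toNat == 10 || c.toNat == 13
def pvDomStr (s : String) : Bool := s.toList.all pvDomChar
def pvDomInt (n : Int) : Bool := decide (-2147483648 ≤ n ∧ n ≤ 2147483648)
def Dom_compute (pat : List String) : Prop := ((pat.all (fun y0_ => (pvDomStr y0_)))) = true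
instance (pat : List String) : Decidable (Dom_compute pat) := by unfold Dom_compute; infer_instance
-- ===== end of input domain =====

-- B uses a different algorithm: a mirror line at split i exists exactly at an even-length
-- palindromic prefix (i = L//2) or suffix (i = DR - L//2) of the row list, so B collects all
-- candidate splits from whole-block palindrome tests and returns the minimum.

-- ===== PORT A =====
-- A's inner while loop: expands outward from split i starting at offset `row`; returns the flag.
def computeWhile (pat : List String) (DR i row : Int) : Bool :=
  if h : i + row < DR ∧ 0 ≤ i - 1 - row then
    if PySem.List.pyGet? pat (i - 1 - row) ≠ PySem.List.pyGet? pat (i + row) then false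
    else computeWhile pat DR i (row + 1)
  else true
termination_by (DR - (i + row)).toNat
decreasing_by omega

-- A's for loop over range(1, DR): first i with pat[i-1]==pat[i] whose expansion keeps the flag.
def computeFor (pat : List String) (DR : Int) : List Int → Option Int
  | [] => none
  | i :: rest =>
    if PySem.List.pyGet? pat (i - 1) = PySem.List.pyGet? pat i then
      if computeWhile pat DR i 1 then some i
      else computeFor pat DR rest
    else computeFor pat DR rest

def compute (pat : List String) : Option Int :=
  computeFor pat (pat.length : Int) (PySem.List.pyRange 1 (pat.length : Int) 1)

-- ===== PORT B =====
-- Source B's two comprehensions over evens = range(2, DR+1, 2):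
--   [L // 2 for L in evens if pat[:L] == pat[:L][::-1]]
-- + [DR - L // 2 for L in evens if pat[-L:] == pat[-L:][::-1]]
def candsOf (pat : List String) : List Int :=
  let DR : Int := (pat.length : Int)
  let evens := PySem.List.pyRange 2 (DR + 1) 2
  ((evens.filter (fun L =>
      decide (PySem.List.slice pat none (some L) = (PySem.List.slice pat none (some L)).reverse))).map
    (fun L => PySem.Int.floordiv L 2))
  ++ ((evens.filter (fun L =>
      decide (PySem.List.slice pat (some (-L)) none = (PySem.List.slice pat (some (-L)) none).reverse))).map
    (fun L => DR - PySem.Int.floordiv L 2))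

-- return min(cands) if cands else False
def compute_alt (pat : List String) : Option Int :=
  PySem.List.min? (candsOf pat) (fun x => x)

-- ===== PRECONDITION & SPEC =====
-- The mirror condition at split mi: the block before the split, reversed, equals the
-- block after it, over their common overlap nn = min mi (len - mi).
def mirrorAt (pat : List String) (mi : Nat) : Prop :=
  (pat.take mi).reverse.take (min mi (pat.length - mi))
    = (pat.drop mi).take (min mi (pat.length - mi))

-- Pre_ excludes grids with no reflection line, on which A returns the bool False — a value
-- outside the declared return type Optional[int]; B returns False there too.
def Pre_compute (pat : List String) : Prop :=
  ∃ mi ∈ Finset.range pat.length, 1 ≤ mi ∧ mirrorAt pat mi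
instance (pat : List String) : Decidable (Pre_compute pat) := by
  unfold Pre_compute mirrorAt; infer_instance
def pvWitness_compute : List String := (["a", "a"])

def Spec_compute (pat : List String) (out : Option Int) : Prop := out = compute_alt pat
instance (pat : List String) (out : Option Int) : Decidable (Spec_compute pat out) := by unfold Spec_compute; infer_instance

-- ===== CLAIM (what is proved, stated in full; the proofs are below) =====
def Claim_equal_compute : Prop := ∀ (pat : List String), Dom_compute pat → Pre_compute pat → Spec_compute pat (compute pat)

-- ===== LEMMAS AND PROOFS =====

-- A's while loop from offset j checks exactly the remaining k = nn - j pairs.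
theorem while_iff (pat : List String) (mi : Nat) (hmi : mi ≤ pat.length) :
    ∀ (k j : Nat), j + k = min mi (pat.length - mi) →
    ((computeWhile pat (pat.length : Int) (mi : Int) (j : Int) = true) ↔
      ((pat.take (mi - j)).reverse.take k = (pat.drop (mi + j)).take k)) := by
  intro k
  induction k with
  | zero =>
    intro j hjk
    rw [computeWhile]
    have hguard : ¬ ((mi : Int) + (j : Int) < (pat.length : Int) ∧ 0 ≤ (mi : Int) - 1 - (j : Int)) := by
      omega
    rw [dif_neg hguard]
    simp
  | succ k ih =>
    intro j hjk
    have hj1 : j < mi := by omega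
    have hlt2 : mi + j < pat.length := by omega
    have hlt1 : mi - 1 - j < pat.length := by omega
    rw [computeWhile]
    have hguard : ((mi : Int) + (j : Int) < (pat.length : Int) ∧ 0 ≤ (mi : Int) - 1 - (j : Int)) := by
      omega
    rw [dif_pos hguard]
    have e1 : PySem.List.pyGet? pat ((mi : Int) - 1 - (j : Int)) = some pat[mi - 1 - j] := by
      have hc : (mi : Int) - 1 - (j : Int) = ((mi - 1 - j : Nat) : Int) := by omega
      rw [hc, PySem.List.pyGet?_natCast, List.getElem?_eq_getElem hlt1]
    have e2 : PySem.List.pyGet? pat ((mi : Int) + (j : Int)) = some pat[mi + j] := by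
      have hc : (mi : Int) + (j : Int) = ((mi + j : Nat) : Int) := by omega
      rw [hc, PySem.List.pyGet?_natCast, List.getElem?_eq_getElem hlt2]
    have etake : (pat.take (mi - j)).reverse = pat[mi - 1 - j] :: (pat.take (mi - 1 - j)).reverse := by
      have h1 : mi - j = (mi - 1 - j) + 1 := by omega
      rw [h1, List.take_add_one, List.getElem?_eq_getElem hlt1]
      simp
    have edrop : pat.drop (mi + j) = pat[mi + j] :: pat.drop (mi + j + 1) :=
      List.drop_eq_getElem_cons hlt2
    rw [e1, e2, etake, edrop]
    by_cases hhd : pat[mi - 1 - j] = pat[mi + j]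
    · rw [if_neg (by simp [hhd])]
      have hcast : (j : Int) + 1 = ((j + 1 : Nat) : Int) := by omega
      rw [hcast, ih (j + 1) (by omega)]
      have h2 : mi - (j + 1) = mi - 1 - j := by omega
      have h3 : mi + (j + 1) = mi + j + 1 := by omega
      rw [h2, h3, List.take_succ_cons, List.take_succ_cons]
      simp [hhd]
    · rw [if_pos (by simp [hhd]), List.take_succ_cons, List.take_succ_cons]
      simp [hhd]

-- A's condition at split mi (adjacent rows equal, then the expansion succeeds) is mirrorAt.
theorem condA_iff (pat : List String) (mi : Nat) (h1 : 1 ≤ mi) (h2 : mi < pat.length) :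
    ((PySem.List.pyGet? pat ((mi : Int) - 1) = PySem.List.pyGet? pat (mi : Int)) ∧
      computeWhile pat (pat.length : Int) (mi : Int) 1 = true) ↔ mirrorAt pat mi := by
  have hnn : 1 ≤ min mi (pat.length - mi) := by omega
  have hlt1 : mi - 1 < pat.length := by omega
  have e1 : PySem.List.pyGet? pat ((mi : Int) - 1) = some pat[mi - 1] := by
    have hc : (mi : Int) - 1 = ((mi - 1 : Nat) : Int) := by omega
    rw [hc, PySem.List.pyGet?_natCast, List.getElem?_eq_getElem hlt1]
  have e2 : PySem.List.pyGet? pat (mi : Int) = some pat[mi] := by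
    rw [PySem.List.pyGet?_natCast, List.getElem?_eq_getElem h2]
  have hw := while_iff pat mi (le_of_lt h2) (min mi (pat.length - mi) - 1) 1 (by omega)
  have hone : ((1 : Nat) : Int) = (1 : Int) := by omega
  rw [hone] at hw
  unfold mirrorAt
  have etake : (pat.take mi).reverse = pat[mi - 1] :: (pat.take (mi - 1)).reverse := by
    have h1' : mi = (mi - 1) + 1 := by omega
    conv_lhs => rw [h1']
    rw [List.take_add_one, List.getElem?_eq_getElem hlt1]
    simp
  have edrop : pat.drop mi = pat[mi] :: pat.drop (mi + 1) := List.drop_eq_getElem_cons h2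
  have hnn' : min mi (pat.length - mi) = (min mi (pat.length - mi) - 1) + 1 := by omega
  rw [e1, e2, hw, etake, edrop]
  conv_rhs => rw [hnn']
  rw [List.take_succ_cons, List.take_succ_cons]
  simp only [Option.some.injEq, List.cons.injEq]

-- An even-length block is a palindrome iff its right half is the reverse of its left half.
theorem palin_iff {α : Type} (A B : List α) (h : A.length = B.length) :
    (A ++ B = (A ++ B).reverse) ↔ B = A.reverse := by
  rw [List.reverse_append]
  constructor
  · intro he
    exact (List.append_inj he (by simp [h])).2
  · intro hb
    rw [hb]
    simp

-- Palindromic prefix of length 2k ⟺ mirror at split k (when the split's overlap touches the left edge).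
theorem prefix_iff (pat : List String) (k : Nat) (h1 : 1 ≤ k) (h2 : 2 * k ≤ pat.length) :
    (pat.take (2 * k) = (pat.take (2 * k)).reverse) ↔ mirrorAt pat k := by
  have h2k : 2 * k = k + k := by omega
  have htake : pat.take (2 * k) = pat.take k ++ (pat.drop k).take k := by
    rw [h2k, List.take_add]
  have hlen : (pat.take k).length = ((pat.drop k).take k).length := by
    simp [List.length_take, List.length_drop]; omega
  rw [htake, palin_iff _ _ hlen]
  unfold mirrorAt
  have hmin : min k (pat.length - k) = k := by omega
  have htk : (pat.take k).reverse.take k = (pat.take k).reverse := by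
    apply List.take_of_length_le
    simp [List.length_take]
  rw [hmin, htk]
  exact eq_comm

-- Palindromic suffix of length 2k ⟺ mirror at split (len - k).
theorem suffix_iff (pat : List String) (k : Nat) (h1 : 1 ≤ k) (h2 : 2 * k ≤ pat.length) :
    (pat.drop (pat.length - 2 * k) = (pat.drop (pat.length - 2 * k)).reverse) ↔
      mirrorAt pat (pat.length - k) := by
  set i := pat.length - k with hi
  have hsplit : pat.drop (pat.length - 2 * k)
      = (pat.drop (pat.length - 2 * k)).take k ++ pat.drop i := by
    conv_lhs => rw [← List.take_append_drop k (pat.drop (pat.length - 2 * k))]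
    congr 1
    rw [List.drop_drop]
    congr 1
    omega
  have hlen : ((pat.drop (pat.length - 2 * k)).take k).length = (pat.drop i).length := by
    simp [List.length_take, List.length_drop]; omega
  rw [hsplit, palin_iff _ _ hlen]
  unfold mirrorAt
  have hmin : min i (pat.length - i) = k := by omega
  have hdk : (pat.drop i).take k = pat.drop i := by
    apply List.take_of_length_le
    rw [List.length_drop]; omega
  have hA : (pat.take i).drop (i - k) = (pat.drop (pat.length - 2 * k)).take k := by
    have e1 : i - k = pat.length - 2 * k := by omega
    have e2 : i - (i - k) = k := by omega
    rw [List.drop_take, e2, e1]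
  have hrev : (pat.take i).reverse.take k = ((pat.take i).drop (i - k)).reverse := by
    rw [List.reverse_drop]
    congr 1
    simp [List.length_take]
    omega
  rw [hmin, hdk, hrev, hA]
  exact eq_comm

-- floordiv of an even natural by 2.
theorem fd_two (k : Nat) : PySem.Int.floordiv ((2 * k : Nat) : Int) 2 = (k : Int) := by
  simp [PySem.Int.floordiv]

-- Membership in B's candidate list characterises the mirror splits.
theorem cands_mem (pat : List String) (x : Int) :
    x ∈ candsOf pat ↔ (1 ≤ x ∧ x < (pat.length : Int) ∧ mirrorAt pat x.toNat) := by
  unfold candsOf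
  simp only [List.mem_append, List.mem_map, List.mem_filter,
    PySem.List.mem_pyRange_iff_of_pos (by norm_num : (0:Int) < 2), decide_eq_true_eq]
  constructor
  · rintro (⟨L, ⟨⟨hL2, hLb, hdvd⟩, hpal⟩, hx⟩ | ⟨L, ⟨⟨hL2, hLb, hdvd⟩, hpal⟩, hx⟩)
    · obtain ⟨c, hc⟩ := hdvd
      have hk : ∃ k : Nat, 1 ≤ k ∧ L = ((2 * k : Nat) : Int) := ⟨(c + 1).toNat, by omega, by omega⟩
      obtain ⟨k, hk1, hkL⟩ := hk
      have hklen : 2 * k ≤ pat.length := by omega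
      have hsl : PySem.List.slice pat none (some L) = pat.take (2 * k) := by
        rw [hkL, PySem.List.slice_to pat (by omega)]
        simp
        omega
      rw [hsl] at hpal
      have hmir := (prefix_iff pat k hk1 hklen).mp hpal
      rw [hkL, fd_two] at hx
      refine ⟨by omega, by omega, ?_⟩
      have : x.toNat = k := by omega
      rw [this]; exact hmir
    · obtain ⟨c, hc⟩ := hdvd
      have hk : ∃ k : Nat, 1 ≤ k ∧ L = ((2 * k : Nat) : Int) := ⟨(c + 1).toNat, by omega, by omega⟩
      obtain ⟨k, hk1, hkL⟩ := hk
      have hklen : 2 * k ≤ pat.length := by omega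
      have hsl : PySem.List.slice pat (some (-L)) none = pat.drop (pat.length - 2 * k) := by
        rw [hkL, PySem.List.slice_from_neg_natCast pat (2 * k) (by omega)]
      rw [hsl] at hpal
      have hmir := (suffix_iff pat k hk1 hklen).mp hpal
      rw [hkL, fd_two] at hx
      refine ⟨by omega, by omega, ?_⟩
      have : x.toNat = pat.length - k := by omega
      rw [this]; exact hmir
  · rintro ⟨hx1, hx2, hmir⟩
    set i := x.toNat with hidef
    have hxi : x = (i : Int) := by omega
    by_cases hcase : 2 * i ≤ pat.length
    · left
      refine ⟨((2 * i : Nat) : Int), ⟨⟨by omega, by omega, ⟨(i : Int) - 1, by omega⟩⟩, ?_⟩, ?_⟩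
      · have hsl : PySem.List.slice pat none (some ((2 * i : Nat) : Int)) = pat.take (2 * i) := by
          rw [PySem.List.slice_to pat (by omega)]
          simp
          omega
        rw [hsl]
        exact (prefix_iff pat i (by omega) hcase).mpr hmir
      · rw [fd_two]; omega
    · right
      set k := pat.length - i with hkdef
      have hk1 : 1 ≤ k := by omega
      have hklen : 2 * k ≤ pat.length := by omega
      refine ⟨((2 * k : Nat) : Int), ⟨⟨by omega, by omega, ⟨(k : Int) - 1, by omega⟩⟩, ?_⟩, ?_⟩
      · have hsl : PySem.List.slice pat (some (-((2 * k : Nat) : Int))) none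
            = pat.drop (pat.length - 2 * k) := by
          rw [PySem.List.slice_from_neg_natCast pat (2 * k) (by omega)]
        rw [hsl]
        have : pat.length - k = i := by omega
        rw [← this] at hmir
        exact (suffix_iff pat k hk1 hklen).mpr hmir
      · rw [fd_two]; omega

-- A's scan from split a returns the least mirror split m ≥ a.
theorem computeFor_some (pat : List String) (m : Int) :
    ∀ (a : Int), 1 ≤ a → a ≤ m → m < (pat.length : Int) → mirrorAt pat m.toNat →
    (∀ j : Int, a ≤ j → j < m → ¬ mirrorAt pat j.toNat) →
    computeFor pat (pat.length : Int) (PySem.List.pyRange a (pat.length : Int) 1) = some m := by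
  intro a
  induction hfuel : (m - a).toNat generalizing a with
  | zero =>
    intro ha ham hm hmir _
    have haem : a = m := by omega
    subst haem
    have hcast : ((a.toNat : Nat) : Int) = a := by omega
    have hc := condA_iff pat a.toNat (by omega) (by omega)
    rw [hcast] at hc
    have hmir' : mirrorAt pat a.toNat := hmir
    obtain ⟨hc1, hc2⟩ := hc.mpr hmir'
    rw [PySem.List.pyRange_one_cons (by omega), computeFor, if_pos hc1, if_pos hc2]
  | succ n ih =>
    intro ha ham hm hmir hleast
    have halt : a < m := by omega
    have hcast : ((a.toNat : Nat) : Int) = a := by omega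
    have hc := condA_iff pat a.toNat (by omega) (by omega)
    rw [hcast] at hc
    have hnota : ¬ mirrorAt pat a.toNat := hleast a le_rfl halt
    have hleast' : ∀ j : Int, a + 1 ≤ j → j < m → ¬ mirrorAt pat j.toNat :=
      fun j hj1 hj2 => hleast j (by omega) hj2
    have hrec : computeFor pat (pat.length : Int)
        (PySem.List.pyRange (a + 1) (pat.length : Int) 1) = some m :=
      ih (a + 1) (by omega) (by omega) (by omega) hm hmir hleast'
    rw [PySem.List.pyRange_one_cons (by omega), computeFor]
    by_cases hc1 : PySem.List.pyGet? pat (a - 1) = PySem.List.pyGet? pat a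
    · have hc2 : ¬ computeWhile pat (pat.length : Int) a 1 = true :=
        fun h => hnota (hc.mp ⟨hc1, h⟩)
      rw [if_pos hc1, if_neg hc2]
      exact hrec
    · rw [if_neg hc1]
      exact hrec

-- ===== VERDICT (by name: the statement is the Claim_ definition above) =====
theorem compute_spec : Claim_equal_compute := by
  intro pat _ hpre
  unfold Spec_compute compute compute_alt
  cases hc : PySem.List.min? (candsOf pat) (fun x => x) with
  | none =>
    exfalso
    obtain ⟨mi, hmem, h1, hmir⟩ := hpre
    have hmi2 : mi < pat.length := Finset.mem_range.mp hmem
    have hin : ((mi : Nat) : Int) ∈ candsOf pat :=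
      (cands_mem pat (mi : Int)).mpr ⟨by omega, by omega, by
        have : ((mi : Nat) : Int).toNat = mi := by omega
        rw [this]; exact hmir⟩
    rw [(PySem.List.min?_eq_none_iff _ _).mp hc] at hin
    simp at hin
  | some m =>
    have hmmem := PySem.List.min?_mem hc
    obtain ⟨h1, h2, hmir⟩ := (cands_mem pat m).mp hmmem
    have hmin := PySem.List.min?_isMin hc
    exact computeFor_some pat m 1 le_rfl h1 h2 hmir (fun j hj1 hj2 hjm => by
      have hjin : j ∈ candsOf pat := (cands_mem pat j).mpr ⟨hj1, by omega, hjm⟩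
      have := hmin j hjin
      omega)
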